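-- pv_equiv track=rewrite | github.com/cdfelixj/wandr | server/services/enhanced_llm_service.py | _generate_unmatched_suggestions
-- ===== SOURCE A (Python) =====
-- from typing import Dict, List, Any, Optional, Tuple
--
-- def _generate_unmatched_suggestions(unmatched_words: List[str], original_text: str) -> List[Dict[str, str]]:
--     """
--     Generate suggestions for unmatched ambiguous words
--     """
--     suggestions = []
--
--     for word in unmatched_words:
--         if word.lower() in ["work", "office", "job"]:
--             suggestions.append({
--                 "word": word,
--                 "suggestion": "Please specify your workplace location or add it to your saved locations",
--                 "action": "add_location"
--             })
--         elif word.lower() in ["home", "house"]: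
--             suggestions.append({
--                 "word": word,
--                 "suggestion": "Please specify your home address or add it to your saved locations",
--                 "action": "add_location"
--             })
--         elif word.lower() in ["gym", "fitness"]:
--             suggestions.append({
--                 "word": word,
--                 "suggestion": "Please specify your gym location or add it to your saved locations",
--                 "action": "add_location"
--             })
--         else:
--             suggestions.append({
--                 "word": word,
--                 "suggestion": f"Please specify what '{word}' refers to or add it to your saved locations",
--                 "action": "add_location"
--             })
--
--     return suggestions
-- ===== SOURCE B (Python) =====
-- from typing import Dict, List, Any, Optional, Tuple
--
-- _GROUPS = [
--     (("work", "office", "job"),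
--      "Please specify your workplace location or add it to your saved locations"),
--     (("home", "house"),
--      "Please specify your home address or add it to your saved locations"),
--     (("gym", "fitness"),
--      "Please specify your gym location or add it to your saved locations"),
-- ]
--
-- def _generate_unmatched_suggestions(unmatched_words: List[str], original_text: str) -> List[Dict[str, str]]:
--     # Staged passes, groups-outer traversal: start every word with its dynamic
--     # default message, then for each keyword group overwrite the message of the
--     # words belonging to it (groups are disjoint, so order of overwrites is moot).
--     lowered = [w.lower() for w in unmatched_words]
--     messages = [
--         f"Please specify what '{w}' refers to or add it to your saved locations"
--         for w in unmatched_words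
--     ]
--     for keywords, msg in _GROUPS:
--         kw = set(keywords)
--         for i, lw in enumerate(lowered):
--             if lw in kw:
--                 messages[i] = msg
--     return [
--         {"word": w, "suggestion": m, "action": "add_location"}
--         for w, m in zip(unmatched_words, messages)
--     ]
-- ===== Notes on version B (the rewrite author's own statement) =====
-- stated objective: alternative
-- what changed: Inverts the traversal: instead of a per-word three-way if-elif cascade in one accumulator loop, B runs staged passes - it seeds every word with the dynamic default message, then iterates keyword groups in the OUTER loop overwriting the messages of matching words (correct because the groups are disjoint), and finally zips words with their messages into the output dicts.
import Mathlib
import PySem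

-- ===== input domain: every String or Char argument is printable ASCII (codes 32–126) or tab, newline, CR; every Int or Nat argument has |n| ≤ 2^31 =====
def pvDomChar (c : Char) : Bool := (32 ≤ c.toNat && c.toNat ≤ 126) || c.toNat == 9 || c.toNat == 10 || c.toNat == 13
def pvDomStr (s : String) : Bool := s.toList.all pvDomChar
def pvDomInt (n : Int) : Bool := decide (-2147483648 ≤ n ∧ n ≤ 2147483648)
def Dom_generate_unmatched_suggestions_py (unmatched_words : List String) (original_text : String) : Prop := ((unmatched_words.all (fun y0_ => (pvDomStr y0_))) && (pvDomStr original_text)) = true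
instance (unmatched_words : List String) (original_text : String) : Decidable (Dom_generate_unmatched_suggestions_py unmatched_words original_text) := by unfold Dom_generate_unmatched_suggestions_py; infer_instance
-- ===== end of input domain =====

-- B inverts the traversal: instead of A's per-word if-elif cascade in one accumulator loop,
-- B seeds every word with the dynamic default message, then loops over the keyword GROUPS
-- overwriting matching words' messages, and finally zips words with messages (objective: alternative).


-- ===== PORT A =====
-- A: accumulator loop; per word, an if/elif cascade over membership in keyword lists.
def pvEntryA (word : String) : List (String × String) :=
  if ["work", "office", "job"].contains (PySem.Str.lower word) then
    [("word", word),
     ("suggestion", "Please specify your workplace location or add it to your saved locations"),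
     ("action", "add_location")]
  else if ["home", "house"].contains (PySem.Str.lower word) then
    [("word", word),
     ("suggestion", "Please specify your home address or add it to your saved locations"),
     ("action", "add_location")]
  else if ["gym", "fitness"].contains (PySem.Str.lower word) then
    [("word", word),
     ("suggestion", "Please specify your gym location or add it to your saved locations"),
     ("action", "add_location")]
  else
    [("word", word),
     ("suggestion", "Please specify what '" ++ word ++ "' refers to or add it to your saved locations"),
     ("action", "add_location")]

def generate_unmatched_suggestions_py (unmatched_words : List String) (original_text : String) : List (List (String × String)) :=
  unmatched_words.foldl (fun suggestions word => suggestions ++ [pvEntryA word]) []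

-- ===== PORT B =====
-- B: staged passes. lowered words; default messages; then for each keyword group (outer loop)
-- overwrite the message of each word whose lowered form is in the group; finally zip into dicts.
def pvGroups : List (List String × String) :=
  [(["work", "office", "job"],
    "Please specify your workplace location or add it to your saved locations"),
   (["home", "house"],
    "Please specify your home address or add it to your saved locations"),
   (["gym", "fitness"],
    "Please specify your gym location or add it to your saved locations")]

def generate_unmatched_suggestions_py_alt (unmatched_words : List String) (original_text : String) : List (List (String × String)) :=
  let lowered := unmatched_words.map PySem.Str.lower
  let messages := unmatched_words.map (fun w =>
    "Please specify what '" ++ w ++ "' refers to or add it to your saved locations")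
  -- the inner 'for i, lw in enumerate(lowered): if lw in kw: messages[i] = msg'
  -- is the positional update List.zipWith over (lowered, messages)
  let messages := pvGroups.foldl (fun ms g =>
    let kw : PySem.Set String := PySem.Set.ofList g.1
    List.zipWith (fun lw m => if PySem.Set.contains kw lw then g.2 else m) lowered ms) messages
  (unmatched_words.zip messages).map (fun p =>
    [("word", p.1), ("suggestion", p.2), ("action", "add_location")])

-- ===== PRECONDITION & SPEC =====
def Spec_generate_unmatched_suggestions_py (unmatched_words : List String) (original_text : String) (out : List (List (String × String))) : Prop := out = generate_unmatched_suggestions_py_alt unmatched_words original_text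
instance (unmatched_words : List String) (original_text : String) (out : List (List (String × String))) : Decidable (Spec_generate_unmatched_suggestions_py unmatched_words original_text out) := by unfold Spec_generate_unmatched_suggestions_py; infer_instance

-- ===== CLAIM (what is proved, stated in full; the proofs are below) =====
def Claim_equal_generate_unmatched_suggestions_py : Prop := ∀ (unmatched_words : List String) (original_text : String), Dom_generate_unmatched_suggestions_py unmatched_words original_text → Spec_generate_unmatched_suggestions_py unmatched_words original_text (generate_unmatched_suggestions_py unmatched_words original_text)

-- ===== LEMMAS AND PROOFS =====

-- The message B computes for one word, after the three group overwrites (last group wins).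
def pvMsgB (word : String) : String :=
  if PySem.Set.contains (PySem.Set.ofList ["gym", "fitness"]) (PySem.Str.lower word) then
    "Please specify your gym location or add it to your saved locations"
  else if PySem.Set.contains (PySem.Set.ofList ["home", "house"]) (PySem.Str.lower word) then
    "Please specify your home address or add it to your saved locations"
  else if PySem.Set.contains (PySem.Set.ofList ["work", "office", "job"]) (PySem.Str.lower word) then
    "Please specify your workplace location or add it to your saved locations"
  else
    "Please specify what '" ++ word ++ "' refers to or add it to your saved locations"

-- B's composite of staged passes collapses to one map of per-word entries.
theorem alt_eq_map (words : List String) (t : String) :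
    generate_unmatched_suggestions_py_alt words t =
      words.map (fun w => [("word", w), ("suggestion", pvMsgB w), ("action", "add_location")]) := by
  unfold generate_unmatched_suggestions_py_alt
  simp only [pvGroups, List.foldl_cons, List.foldl_nil]
  induction words with
  | nil => rfl
  | cons w ws ih =>
    simp only [List.map_cons, List.zipWith_cons_cons, List.zip_cons_cons] at *
    rw [ih]
    simp [pvMsgB]


-- Per-word agreement: A's cascade equals B's overwrite result (the keyword groups are disjoint).
theorem entryA_eq (word : String) :
    pvEntryA word = [("word", word), ("suggestion", pvMsgB word), ("action", "add_location")] := by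
  unfold pvEntryA pvMsgB
  by_cases h1 : PySem.Str.lower word = "work"
  · simp [h1]
  by_cases h2 : PySem.Str.lower word = "office"
  · simp [h2]
  by_cases h3 : PySem.Str.lower word = "job"
  · simp [h3]
  by_cases h4 : PySem.Str.lower word = "home"
  · simp [h4]
  by_cases h5 : PySem.Str.lower word = "house"
  · simp [h5]
  by_cases h6 : PySem.Str.lower word = "gym"
  · simp [h6]
  by_cases h7 : PySem.Str.lower word = "fitness"
  · simp [h7]
  · simp [PySem.Set.contains, PySem.Set.ofList, h1, h2, h3, h4, h5, h6, h7]

-- ===== VERDICT (by name: the statement is the Claim_ definition above) =====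
theorem generate_unmatched_suggestions_py_spec : Claim_equal_generate_unmatched_suggestions_py := by
  intro unmatched_words original_text _
  unfold Spec_generate_unmatched_suggestions_py
  unfold generate_unmatched_suggestions_py
  rw [PySem.List.foldl_append_singleton_eq_map, alt_eq_map]
  simp only [List.nil_append]
  exact List.map_congr_left (fun w _ => entryA_eq w)
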